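-- pv_equiv track=rewrite | github.com/Go-ideas/Sondeo_Adaptativo | auto_calibrator.py | derive_codex_action
-- ===== SOURCE A (Python) =====
-- from typing import Any, Dict, List, Optional
--
-- def derive_codex_action(diagnostico: List[str]) -> tuple[str, str, str]:
--     diag = [str(x).strip().lower() for x in (diagnostico or []) if str(x).strip()]
--     if "accepted_bajo" in diag:
--         return (
--             "accepted_bajo",
--             "interview_engine.py",
--             "Aumentar deteccion semantica util y seguimiento por foco",
--         )
--     if "coverage_util_baja" in diag:
--         return (
--             "coverage_util_baja",
--             "interview_engine.py",
--             "Mejorar profundidad util y evidencia por atributo",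
--         )
--     if "human_like_bajo" in diag:
--         return (
--             "human_like_bajo",
--             "interview_engine.py",
--             "Mejorar naturalidad de preguntas",
--         )
--     return (
--         "sin_diagnostico",
--         "interview_engine.py",
--         "Revisar reglas del moderador",
--     )
-- ===== SOURCE B (Python) =====
-- _RANK = {"accepted_bajo": 0, "coverage_util_baja": 1, "human_like_bajo": 2}
--
-- _OUTS = [
--     ("accepted_bajo", "interview_engine.py",
--      "Aumentar deteccion semantica util y seguimiento por foco"),
--     ("coverage_util_baja", "interview_engine.py",
--      "Mejorar profundidad util y evidencia por atributo"),
--     ("human_like_bajo", "interview_engine.py",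
--      "Mejorar naturalidad de preguntas"),
--     ("sin_diagnostico", "interview_engine.py",
--      "Revisar reglas del moderador"),
-- ]
--
--
-- def derive_codex_action(diagnostico):
--     best = 3
--     for x in (diagnostico or []):
--         s = str(x).strip()
--         if s:
--             best = min(best, _RANK.get(s.lower(), 3))
--     return _OUTS[best]
-- ===== Notes on version B (the rewrite author's own statement) =====
-- stated objective: alternative
-- what changed: Instead of testing each diagnostic key for membership in the normalized list in priority order, B makes a single pass over the input accumulating the minimum priority rank seen and indexes an output table by that rank.
import Mathlib
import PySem

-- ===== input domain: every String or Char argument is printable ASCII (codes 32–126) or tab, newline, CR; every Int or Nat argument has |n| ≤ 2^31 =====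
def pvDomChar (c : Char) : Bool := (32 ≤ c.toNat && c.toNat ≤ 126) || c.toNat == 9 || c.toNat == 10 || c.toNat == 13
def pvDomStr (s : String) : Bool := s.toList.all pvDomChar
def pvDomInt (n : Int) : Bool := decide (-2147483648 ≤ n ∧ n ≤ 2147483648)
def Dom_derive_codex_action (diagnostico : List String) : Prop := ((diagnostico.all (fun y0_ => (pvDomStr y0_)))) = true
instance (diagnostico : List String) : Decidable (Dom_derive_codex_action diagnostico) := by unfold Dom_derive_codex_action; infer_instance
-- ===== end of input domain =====

-- B replaces A's priority if-chain of membership tests with a single pass over the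
-- input accumulating the minimum priority rank, then indexes an output table (alternative; same behaviour proved).

-- ===== PORT A =====
def derive_codex_action (diagnostico : List String) : String × String × String :=
  let diag : List String :=
    (diagnostico.filter (fun x => !(PySem.Str.strip x == ""))).map
      (fun x => PySem.Str.lower (PySem.Str.strip x))
  if diag.contains "accepted_bajo" then
    ("accepted_bajo", "interview_engine.py",
     "Aumentar deteccion semantica util y seguimiento por foco")
  else if diag.contains "coverage_util_baja" then
    ("coverage_util_baja", "interview_engine.py",
     "Mejorar profundidad util y evidencia por atributo")
  else if diag.contains "human_like_bajo" then
    ("human_like_bajo", "interview_engine.py",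
     "Mejorar naturalidad de preguntas")
  else
    ("sin_diagnostico", "interview_engine.py",
     "Revisar reglas del moderador")

-- ===== PORT B =====
-- _RANK.get(t, 3) from Source B, as a function
def codexRank (t : String) : Nat :=
  if t == "accepted_bajo" then 0
  else if t == "coverage_util_baja" then 1
  else if t == "human_like_bajo" then 2
  else 3

def codexOuts : List (String × String × String) :=
  [("accepted_bajo", "interview_engine.py",
    "Aumentar deteccion semantica util y seguimiento por foco"),
   ("coverage_util_baja", "interview_engine.py",
    "Mejorar profundidad util y evidencia por atributo"),
   ("human_like_bajo", "interview_engine.py",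
    "Mejorar naturalidad de preguntas"),
   ("sin_diagnostico", "interview_engine.py",
    "Revisar reglas del moderador")]

def codexStep (best : Nat) (x : String) : Nat :=
  let s := PySem.Str.strip x
  if s == "" then best else min best (codexRank (PySem.Str.lower s))

def derive_codex_action_alt (diagnostico : List String) : String × String × String :=
  let best := diagnostico.foldl codexStep 3
  -- _OUTS[best]: best is always in range 0..3, so list indexing never raises
  codexOuts.getD best ("", "", "")

-- ===== PRECONDITION & SPEC =====
def Spec_derive_codex_action (diagnostico : List String) (out : String × String × String) : Prop := out = derive_codex_action_alt diagnostico
instance (diagnostico : List String) (out : String × String × String) : Decidable (Spec_derive_codex_action diagnostico out) := by unfold Spec_derive_codex_action; infer_instance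

-- ===== CLAIM =====
def Claim_equal_derive_codex_action : Prop := ∀ (diagnostico : List String), Dom_derive_codex_action diagnostico → Spec_derive_codex_action diagnostico (derive_codex_action diagnostico)

-- ===== LEMMAS AND PROOFS =====
-- rank of A's if-chain over the normalized list
def chainRank (l : List String) : Nat :=
  if l.contains "accepted_bajo" then 0
  else if l.contains "coverage_util_baja" then 1
  else if l.contains "human_like_bajo" then 2
  else 3

lemma chainRank_le (l : List String) : chainRank l ≤ 3 := by
  unfold chainRank; split_ifs <;> omega

lemma chainRank_cons (t : String) (l : List String) :
    chainRank (t :: l) = min (codexRank t) (chainRank l) := by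
  unfold chainRank codexRank
  by_cases m0 : "accepted_bajo" ∈ l <;> by_cases m1 : "coverage_util_baja" ∈ l <;>
    by_cases m2 : "human_like_bajo" ∈ l <;>
      by_cases h0 : "accepted_bajo" = t <;> by_cases h1 : "coverage_util_baja" = t <;>
        by_cases h2 : "human_like_bajo" = t <;>
          simp_all <;> split_ifs <;> simp_all

lemma foldl_codexStep (d : List String) :
    ∀ b : Nat, b ≤ 3 →
      d.foldl codexStep b =
        min b (chainRank ((d.filter (fun x => !(PySem.Str.strip x == ""))).map
          (fun x => PySem.Str.lower (PySem.Str.strip x)))) := by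
  induction d with
  | nil => intro b hb; simp [chainRank]; omega
  | cons x xs ih =>
    intro b hb
    by_cases hx : PySem.Str.strip x == ""
    · simpa [List.foldl, codexStep, hx] using ih b hb
    · have hr : min b (codexRank (PySem.Str.lower (PySem.Str.strip x))) ≤ 3 := by omega
      have hfilter : (x :: xs).filter (fun y => !(PySem.Str.strip y == "")) =
          x :: xs.filter (fun y => !(PySem.Str.strip y == "")) := by
        simp [hx]
      simp only [List.foldl, codexStep, hx, Bool.false_eq_true, if_false, hfilter,
        List.map_cons]
      rw [ih _ hr, chainRank_cons]
      omega

-- ===== VERDICT =====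
theorem derive_codex_action_spec : Claim_equal_derive_codex_action := by
  intro d _
  unfold Spec_derive_codex_action derive_codex_action derive_codex_action_alt
  rw [foldl_codexStep d 3 (le_refl 3)]
  set diag : List String :=
    (d.filter (fun x => !(PySem.Str.strip x == ""))).map
      (fun x => PySem.Str.lower (PySem.Str.strip x)) with hdiag
  have hle := chainRank_le diag
  have hmin : min 3 (chainRank diag) = chainRank diag := by omega
  rw [hmin]
  by_cases h1 : "accepted_bajo" ∈ diag <;>
    by_cases h2 : "coverage_util_baja" ∈ diag <;>
      by_cases h3 : "human_like_bajo" ∈ diag <;>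
        simp [chainRank, h1, h2, h3, codexOuts, List.getD]
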